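-- pv_equiv track=rewrite | github.com/muhanurozulgyuyo/coding-test | 프로그래머스/0/181883. 수열과 구간 쿼리 1/수열과 구간 쿼리 1.py | solution
-- ===== SOURCE A (Python) =====
-- def solution(arr, queries):
--     answer = []
--     for j in range(len(queries)):
--         s = queries[j][0]
--         e = queries[j][1]
--         for i in range(len(arr)):
--             if i >= s and i <= e:
--                 arr[i] += 1
--
--     return arr
-- ===== SOURCE B (Python) =====
-- def solution(arr, queries):
--     # Difference array: O(n+q) instead of A's O(n*q); returns a new list (A mutates arr in place).
--     n = len(arr)
--     diff = [0] * (n + 1)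
--     for q in queries:
--         s, e = q[0], q[1]
--         lo = max(s, 0)
--         hi = min(e, n - 1)
--         if lo <= hi:
--             diff[lo] += 1
--             diff[hi + 1] -= 1
--     out = []
--     run = 0
--     for i, a in enumerate(arr):
--         run += diff[i]
--         out.append(a + run)
--     return out
-- ===== Notes on version B (the rewrite author's own statement) =====
-- stated objective: faster
-- what changed: Replaced the per-query scan over the whole array (O(n*q)) by a difference array with +1/-1 endpoint marks and one prefix-sum pass (O(n+q)); B returns a new list instead of mutating arr in place (return value identical).
import Mathlib
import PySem

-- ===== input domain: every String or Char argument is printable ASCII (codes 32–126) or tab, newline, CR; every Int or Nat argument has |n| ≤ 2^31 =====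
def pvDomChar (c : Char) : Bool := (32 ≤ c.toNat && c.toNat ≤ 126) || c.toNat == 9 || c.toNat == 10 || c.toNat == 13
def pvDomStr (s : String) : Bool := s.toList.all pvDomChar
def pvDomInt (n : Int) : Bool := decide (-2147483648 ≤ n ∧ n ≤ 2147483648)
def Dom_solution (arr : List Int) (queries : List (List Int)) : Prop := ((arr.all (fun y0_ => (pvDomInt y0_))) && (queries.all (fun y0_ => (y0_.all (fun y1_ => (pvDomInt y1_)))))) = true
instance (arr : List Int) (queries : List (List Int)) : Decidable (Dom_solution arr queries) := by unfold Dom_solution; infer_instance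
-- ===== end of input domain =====

-- B replaces A's per-query scan of the whole array by a difference array + one prefix-sum pass
-- (O(n+q) instead of O(n*q)); equivalence is about the RETURN value only: A mutates arr in place, B builds a new list.

-- ===== PORT A =====
def solution (arr : List Int) (queries : List (List Int)) : List Int :=
  (PySem.List.pyRange 0 (PySem.List.len queries) 1).foldl (fun a j =>
    let q := PySem.List.pyGetD queries j []
    let s := PySem.List.pyGetD q 0 0
    let e := PySem.List.pyGetD q 1 0
    (PySem.List.pyRange 0 (PySem.List.len a) 1).foldl (fun a2 i =>
      if i ≥ s ∧ i ≤ e then PySem.List.pySetD a2 i (PySem.List.pyGetD a2 i 0 + 1) else a2) a) arr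

-- ===== PORT B =====
-- one query's diff-array update: +1 at lo, -1 at hi+1 for the clamped, nonempty interval
def stepB (n : Nat) (d : List Int) (q : List Int) : List Int :=
  let s := PySem.List.pyGetD q 0 0
  let e := PySem.List.pyGetD q 1 0
  let lo := max s 0
  let hi := min e ((n : Int) - 1)
  if lo ≤ hi then
    let d1 := PySem.List.pySetD d lo (PySem.List.pyGetD d lo 0 + 1)
    PySem.List.pySetD d1 (hi + 1) (PySem.List.pyGetD d1 (hi + 1) 0 - 1)
  else d

def bDiff (n : Nat) (queries : List (List Int)) : List Int :=
  queries.foldl (stepB n) (List.replicate (n + 1) 0)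

-- the running-prefix-sum output pass (Source B's enumerate loop)
def bScan (diff : List Int) : List Int → Nat → Int → List Int
  | [], _, _ => []
  | a :: as, i, run =>
    let run' := run + diff.getD i 0
    (a + run') :: bScan diff as (i + 1) run'

def solution_alt (arr : List Int) (queries : List (List Int)) : List Int :=
  bScan (bDiff arr.length queries) arr 0 0

-- ===== PRECONDITION & SPEC =====
-- Pre_ excludes exactly the inputs on which A raises IndexError: a query with fewer than two elements.
def Pre_solution (arr : List Int) (queries : List (List Int)) : Prop :=
  ∀ q ∈ queries, 2 ≤ q.length
instance (arr : List Int) (queries : List (List Int)) : Decidable (Pre_solution arr queries) := by unfold Pre_solution; infer_instance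
def pvWitness_solution : List Int × List (List Int) := ([1, 2, 3], [[0, 1], [1, 2]])

def Spec_solution (arr : List Int) (queries : List (List Int)) (out : List Int) : Prop := out = solution_alt arr queries
instance (arr : List Int) (queries : List (List Int)) (out : List Int) : Decidable (Spec_solution arr queries out) := by unfold Spec_solution; infer_instance

-- ===== CLAIM (what is proved, stated in full; the proofs are below) =====
def Claim_equal_solution : Prop := ∀ (arr : List Int) (queries : List (List Int)), Dom_solution arr queries → Pre_solution arr queries → Spec_solution arr queries (solution arr queries)

-- ===== LEMMAS AND PROOFS =====

-- the number of queries whose interval covers index j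
def cnt (qs : List (List Int)) (j : Nat) : Int :=
  (qs.countP (fun q => decide ((j : Int) ≥ PySem.List.pyGetD q 0 0 ∧ (j : Int) ≤ PySem.List.pyGetD q 1 0)) : Nat)

-- sum of the first m entries of the diff list
def psum (d : List Int) (m : Nat) : Int := ∑ k ∈ Finset.range m, d.getD k 0

def sumFrom (d : List Int) : Nat → Nat → Int
  | _, 0 => 0
  | i, m + 1 => d.getD i 0 + sumFrom d (i + 1) m

lemma getD_eq_get {l : List Int} {n : Nat} (h : n < l.length) (d : Int) : l.getD n d = l[n] := by
  simp [List.getD_eq_getElem?_getD, List.getElem?_eq_getElem h]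

lemma getD_set_lt {d : List Int} {a : Nat} (ha : a < d.length) (v : Int) (k : Nat) :
    (d.set a v).getD k 0 = if k = a then v else d.getD k 0 := by
  by_cases h : k = a
  · simp [List.getD_eq_getElem?_getD, h, ha]
  · simp [List.getD_eq_getElem?_getD, h, Ne.symm h]

lemma psum_set {d : List Int} {a : Nat} (ha : a < d.length) (c : Int) (m : Nat) :
    psum (d.set a (d.getD a 0 + c)) m = psum d m + (if a < m then c else 0) := by
  have h1 : ∀ k, (d.set a (d.getD a 0 + c)).getD k 0 = d.getD k 0 + (if k = a then c else 0) := by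
    intro k
    rw [getD_set_lt ha]
    by_cases h : k = a <;> simp [h]
  simp only [psum, h1, Finset.sum_add_distrib, Finset.sum_ite_eq' (Finset.range m) a (fun _ => c),
    Finset.mem_range]

-- A's inner loop body, named
def upd (s e : Int) (a2 : List Int) (k : Nat) : List Int :=
  if (k : Int) ≥ s ∧ (k : Int) ≤ e then PySem.List.pySetD a2 (k : Int) (PySem.List.pyGetD a2 (k : Int) 0 + 1) else a2

-- A's inner pass, generalized to a nodup list of in-range indices
lemma innerNat (s e : Int) :
    ∀ (l : List Nat) (a : List Int), l.Nodup → (∀ x ∈ l, x < a.length) →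
    (l.foldl (upd s e) a).length = a.length ∧
    ∀ j : Nat, (l.foldl (upd s e) a).getD j 0
      = a.getD j 0 + (if j ∈ l ∧ (j : Int) ≥ s ∧ (j : Int) ≤ e then 1 else 0) := by
  intro l
  induction l with
  | nil => intro a _ _; simp
  | cons k t ih =>
    intro a hnd hb
    have hkt : k ∉ t := (List.nodup_cons.mp hnd).1
    have hndt : t.Nodup := (List.nodup_cons.mp hnd).2
    have hk : k < a.length := hb k (by simp)
    have ha'2 : upd s e a k = if (k : Int) ≥ s ∧ (k : Int) ≤ e then a.set k (a.getD k 0 + 1) else a := by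
      unfold upd; split_ifs with h <;> simp [PySem.List.pySetD_natCast, PySem.List.pyGetD_natCast]
    have hlen' : (upd s e a k).length = a.length := by rw [ha'2]; split_ifs <;> simp
    have hstep : ∀ j : Nat, (upd s e a k).getD j 0 = a.getD j 0 + (if j = k ∧ (j : Int) ≥ s ∧ (j : Int) ≤ e then 1 else 0) := by
      intro j
      rw [ha'2]
      by_cases hck : ((k : Int) ≥ s ∧ (k : Int) ≤ e)
      · rw [if_pos hck, getD_set_lt hk]
        by_cases hjk : j = k
        · subst hjk; simp [hck]
        · simp [hjk]
      · rw [if_neg hck]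
        have hno : ¬ (j = k ∧ (j : Int) ≥ s ∧ (j : Int) ≤ e) := by
          rintro ⟨rfl, hc⟩; exact hck hc
        simp [hno]
    have hbt : ∀ x ∈ t, x < (upd s e a k).length := by
      intro x hx; rw [hlen']; exact hb x (by simp [hx])
    obtain ⟨ihl, ihg⟩ := ih (upd s e a k) hndt hbt
    rw [List.foldl_cons]
    refine ⟨by rw [ihl, hlen'], ?_⟩
    intro j
    rw [ihg j, hstep j]
    by_cases hc : ((j : Int) ≥ s ∧ (j : Int) ≤ e)
    · by_cases hjk : j = k
      · subst hjk
        rw [if_pos ⟨rfl, hc⟩, if_neg (fun h => hkt h.1), if_pos ⟨by simp, hc⟩]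
        ring
      · rw [if_neg (fun h => hjk h.1)]
        by_cases hjt : j ∈ t
        · rw [if_pos ⟨hjt, hc⟩, if_pos ⟨by simp [hjt], hc⟩]
          ring
        · rw [if_neg (fun h => hjt h.1), if_neg (fun h => (List.mem_cons.mp h.1).elim hjk hjt)]
          ring
    · rw [if_neg (fun h => hc h.2), if_neg (fun h => hc h.2), if_neg (fun h => hc h.2)]
      ring

-- A's inner loop over pyRange equals the Nat-indexed fold of upd
lemma inner_eq (s e : Int) (a : List Int) :
    (PySem.List.pyRange 0 (PySem.List.len a) 1).foldl (fun a2 i =>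
      if i ≥ s ∧ i ≤ e then PySem.List.pySetD a2 i (PySem.List.pyGetD a2 i 0 + 1) else a2) a
    = (List.range a.length).foldl (upd s e) a := by
  rw [PySem.List.pyRange_one, List.foldl_map]
  have h1 : ((PySem.List.len a) - 0).toNat = a.length := by simp
  rw [h1]
  congr 1
  funext a2 k
  simp [upd]

-- A's outer loop equals a fold of stepA-like bodies over queries
def stepA (a : List Int) (q : List Int) : List Int :=
  (List.range a.length).foldl (upd (PySem.List.pyGetD q 0 0) (PySem.List.pyGetD q 1 0)) a

lemma solution_eq_fold (arr : List Int) (queries : List (List Int)) :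
    solution arr queries = queries.foldl stepA arr := by
  unfold solution
  rw [show (fun (a : List Int) (j : Int) =>
        let q := PySem.List.pyGetD queries j []
        let s := PySem.List.pyGetD q 0 0
        let e := PySem.List.pyGetD q 1 0
        (PySem.List.pyRange 0 (PySem.List.len a) 1).foldl (fun a2 i =>
          if i ≥ s ∧ i ≤ e then PySem.List.pySetD a2 i (PySem.List.pyGetD a2 i 0 + 1) else a2) a)
      = (fun (a : List Int) (j : Int) => stepA a (PySem.List.pyGetD queries j [])) from by
        funext a j
        show _ = stepA a (PySem.List.pyGetD queries j [])
        rw [stepA, ← inner_eq]]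
  exact PySem.List.foldl_pyRange_zero_pyGetD queries [] stepA arr

lemma stepA_char (a q : List Int) :
    (stepA a q).length = a.length ∧
    ∀ j : Nat, j < a.length → (stepA a q).getD j 0
      = a.getD j 0 + (if (j : Int) ≥ PySem.List.pyGetD q 0 0 ∧ (j : Int) ≤ PySem.List.pyGetD q 1 0 then 1 else 0) := by
  obtain ⟨hl, hg⟩ := innerNat (PySem.List.pyGetD q 0 0) (PySem.List.pyGetD q 1 0)
    (List.range a.length) a (List.nodup_range) (by intro x hx; simpa using hx)
  refine ⟨hl, ?_⟩
  intro j hj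
  rw [stepA, hg j]
  have hiff : (j ∈ List.range a.length ∧ (j : Int) ≥ PySem.List.pyGetD q 0 0 ∧ (j : Int) ≤ PySem.List.pyGetD q 1 0)
      ↔ ((j : Int) ≥ PySem.List.pyGetD q 0 0 ∧ (j : Int) ≤ PySem.List.pyGetD q 1 0) := by
    simp [List.mem_range, hj]
  rw [if_congr hiff rfl rfl]

lemma solution_char (qs : List (List Int)) :
    ∀ (a : List Int),
    (solution a qs).length = a.length ∧
    ∀ j : Nat, j < a.length → (solution a qs).getD j 0 = a.getD j 0 + cnt qs j := by
  have main : ∀ (a : List Int),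
      (qs.foldl stepA a).length = a.length ∧
      ∀ j : Nat, j < a.length → (qs.foldl stepA a).getD j 0 = a.getD j 0 + cnt qs j := by
    induction qs with
    | nil => intro a; simp [cnt]
    | cons q t ih =>
      intro a
      obtain ⟨hl, hg⟩ := stepA_char a q
      obtain ⟨ihl, ihg⟩ := ih (stepA a q)
      refine ⟨by rw [List.foldl_cons, ihl, hl], ?_⟩
      intro j hj
      rw [List.foldl_cons, ihg j (by rw [hl]; exact hj), hg j hj]
      unfold cnt
      rw [List.countP_cons]
      push_cast
      simp only [decide_eq_true_eq]
      ring
  intro a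
  obtain ⟨h1, h2⟩ := main a
  exact ⟨by rw [solution_eq_fold, h1], fun j hj => by rw [solution_eq_fold, h2 j hj]⟩

lemma psum_replicate (n m : Nat) : psum (List.replicate (n + 1) (0 : Int)) m = 0 := by
  unfold psum
  have h : ∀ k : Nat, (List.replicate (n + 1) (0 : Int)).getD k 0 = 0 := by
    intro k
    by_cases hk : k < n + 1 <;> simp [List.getD_eq_getElem?_getD, List.getElem?_replicate, hk]
  simp [h]

lemma stepB_char (n : Nat) (d q : List Int) (hd : d.length = n + 1) :
    (stepB n d q).length = n + 1 ∧
    ∀ j : Nat, j < n → psum (stepB n d q) (j + 1)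
      = psum d (j + 1) + (if (j : Int) ≥ PySem.List.pyGetD q 0 0 ∧ (j : Int) ≤ PySem.List.pyGetD q 1 0 then 1 else 0) := by
  unfold stepB
  set s := PySem.List.pyGetD q 0 0 with hs
  set e := PySem.List.pyGetD q 1 0 with he
  by_cases h : max s 0 ≤ min e ((n : Int) - 1)
  · rw [if_pos h]
    have hlo0 : (0 : Int) ≤ max s 0 := le_max_right s 0
    have hhi0 : (0 : Int) ≤ min e ((n : Int) - 1) + 1 := by omega
    have hlolt : (max s 0).toNat < d.length := by rw [hd]; omega
    have hhilt : (min e ((n : Int) - 1) + 1).toNat < d.length := by rw [hd]; omega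
    have e1 : PySem.List.pySetD d (max s 0) (PySem.List.pyGetD d (max s 0) 0 + 1)
        = d.set (max s 0).toNat (d.getD (max s 0).toNat 0 + 1) := by
      rw [PySem.List.pySetD_of_nonneg _ _ hlo0,
          PySem.List.pyGetD_eq_getElem _ _ hlo0 (by push_cast [hd]; omega),
          getD_eq_get hlolt]
    set d1 := d.set (max s 0).toNat (d.getD (max s 0).toNat 0 + 1) with hd1
    have hd1len : d1.length = n + 1 := by rw [hd1, List.length_set, hd]
    have hhilt1 : (min e ((n : Int) - 1) + 1).toNat < d1.length := by rw [hd1len]; rw [hd] at hhilt; exact hhilt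
    have e2 : PySem.List.pySetD d1 (min e ((n : Int) - 1) + 1) (PySem.List.pyGetD d1 (min e ((n : Int) - 1) + 1) 0 - 1)
        = d1.set (min e ((n : Int) - 1) + 1).toNat (d1.getD (min e ((n : Int) - 1) + 1).toNat 0 + (-1)) := by
      rw [PySem.List.pySetD_of_nonneg _ _ hhi0,
          PySem.List.pyGetD_eq_getElem _ _ hhi0 (by push_cast [hd1len]; omega),
          getD_eq_get hhilt1]
      simp [sub_eq_add_neg]
    rw [e1, e2]
    constructor
    · simp [hd1len]
    · intro j hj
      rw [psum_set hhilt1 (-1) (j + 1), hd1, psum_set hlolt 1 (j + 1)]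
      have hind : (if (max s 0).toNat < j + 1 then (1 : Int) else 0)
          + (if (min e ((n : Int) - 1) + 1).toNat < j + 1 then (-1 : Int) else 0)
          = (if (j : Int) ≥ s ∧ (j : Int) ≤ e then 1 else 0) := by
        split_ifs <;> omega
      rw [← hind]
      ring
  · rw [if_neg h]
    refine ⟨hd, ?_⟩
    intro j hj
    have hno : ¬ ((j : Int) ≥ s ∧ (j : Int) ≤ e) := by
      rintro ⟨h1, h2⟩
      exact h (by omega)
    rw [if_neg hno]
    ring

lemma bDiff_char (n : Nat) (qs : List (List Int)) :
    (bDiff n qs).length = n + 1 ∧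
    ∀ j : Nat, j < n → psum (bDiff n qs) (j + 1) = cnt qs j := by
  have main : ∀ (d : List Int), d.length = n + 1 →
      (qs.foldl (stepB n) d).length = n + 1 ∧
      ∀ j : Nat, j < n → psum (qs.foldl (stepB n) d) (j + 1) = psum d (j + 1) + cnt qs j := by
    induction qs with
    | nil => intro d hd; refine ⟨hd, ?_⟩; intro j hj; simp [cnt]
    | cons q t ih =>
      intro d hd
      obtain ⟨hl, hg⟩ := stepB_char n d q hd
      obtain ⟨ihl, ihg⟩ := ih (stepB n d q) hl
      refine ⟨by rw [List.foldl_cons]; exact ihl, ?_⟩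
      intro j hj
      rw [List.foldl_cons, ihg j hj, hg j hj]
      unfold cnt
      rw [List.countP_cons]
      push_cast
      simp only [decide_eq_true_eq]
      ring
  obtain ⟨h1, h2⟩ := main (List.replicate (n + 1) 0) (by simp)
  exact ⟨h1, fun j hj => by rw [bDiff] at *; rw [h2 j hj, psum_replicate]; ring⟩

lemma bScan_char (d : List Int) :
    ∀ (as : List Int) (i : Nat) (run : Int),
    (bScan d as i run).length = as.length ∧
    ∀ j : Nat, j < as.length → (bScan d as i run).getD j 0 = as.getD j 0 + run + sumFrom d i (j + 1) := by
  intro as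
  induction as with
  | nil => intro i run; simp [bScan]
  | cons a as ih =>
    intro i run
    refine ⟨by simp only [bScan, List.length_cons, (ih (i+1) (run + d.getD i 0)).1], ?_⟩
    intro j hj
    cases j with
    | zero => simp [bScan, sumFrom]; ring
    | succ j =>
      have h2 := (ih (i + 1) (run + d.getD i 0)).2 j (by simpa using hj)
      simp only [bScan, List.getD_cons_succ, h2, sumFrom]
      ring

lemma sumFrom_eq (d : List Int) : ∀ (m i : Nat), sumFrom d i m = ∑ k ∈ Finset.range m, d.getD (i + k) 0 := by
  intro m
  induction m with
  | zero => intro i; simp [sumFrom]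
  | succ m ih =>
    intro i
    rw [sumFrom, ih (i + 1), Finset.sum_range_succ' (fun k => d.getD (i + k) 0) m]
    have h : ∀ k : Nat, i + 1 + k = i + (k + 1) := by omega
    simp only [h, Nat.add_zero]
    ring

lemma sumFrom_zero (d : List Int) (m : Nat) : sumFrom d 0 m = psum d m := by
  rw [sumFrom_eq d m 0]
  unfold psum
  simp

-- ===== VERDICT (by name: the statement is the Claim_ definition above) =====
theorem solution_spec : Claim_equal_solution := by
  intro arr queries _ _
  unfold Spec_solution
  obtain ⟨hal, hag⟩ := solution_char queries arr
  obtain ⟨hdl, hdg⟩ := bDiff_char arr.length queries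
  obtain ⟨hbl, hbg⟩ := bScan_char (bDiff arr.length queries) arr 0 0
  apply List.ext_getElem
  · rw [hal]; unfold solution_alt; rw [hbl]
  · intro i h1 h2
    have hi : i < arr.length := by rw [hal] at h1; exact h1
    have e1 : (solution arr queries)[i] = (solution arr queries).getD i 0 :=
      (getD_eq_get h1 0).symm
    have e2 : (solution_alt arr queries)[i] = (solution_alt arr queries).getD i 0 :=
      (getD_eq_get h2 0).symm
    rw [e1, e2, hag i hi]
    unfold solution_alt
    rw [hbg i hi, sumFrom_zero, hdg i hi]
    ring
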